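-- pv_equiv track=rewrite | github.com/rendyuwu/noa | apps/api/src/noa_api/core/workflows/types.py | _messages_since_last_user
-- ===== SOURCE A (Python) =====
-- def _messages_since_last_user(
--     working_messages: list[dict[str, object]],
-- ) -> list[dict[str, object]]:
--     last_user_index = -1
--     for index, message in enumerate(working_messages):
--         if message.get("role") == "user":
--             last_user_index = index
--     return working_messages[last_user_index + 1 :]
-- ===== SOURCE B (Python) =====
-- def _messages_since_last_user(working_messages):
--     tail = []
--     for message in reversed(working_messages):
--         if message.get("role") == "user":
--             return tail
--         tail = [message] + tail
--     return tail
-- ===== Notes on version B (the rewrite author's own statement) =====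
-- stated objective: alternative
-- what changed: Backward scan over reversed(working_messages) that accumulates the result list directly and returns early at the first user message, instead of a full forward scan tracking the last user index followed by a slice.
import Mathlib
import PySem

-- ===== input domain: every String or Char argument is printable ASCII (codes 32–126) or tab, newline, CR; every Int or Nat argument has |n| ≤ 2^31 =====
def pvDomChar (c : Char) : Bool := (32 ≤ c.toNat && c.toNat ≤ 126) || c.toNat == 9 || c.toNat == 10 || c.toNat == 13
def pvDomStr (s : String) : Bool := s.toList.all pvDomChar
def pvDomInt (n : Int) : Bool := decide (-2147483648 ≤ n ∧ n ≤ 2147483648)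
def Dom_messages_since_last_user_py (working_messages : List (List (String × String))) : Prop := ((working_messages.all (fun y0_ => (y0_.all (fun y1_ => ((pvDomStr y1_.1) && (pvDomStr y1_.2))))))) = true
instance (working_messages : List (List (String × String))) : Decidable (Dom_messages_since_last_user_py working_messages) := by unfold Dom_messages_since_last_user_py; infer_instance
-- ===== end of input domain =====

-- B replaces A's full forward scan with an early-exiting backward scan that builds the result directly (objective: alternative).

-- message.get("role") == "user" on an assoc-list dict: first-match lookup
def msluRoleIsUser (m : List (String × String)) : Bool :=
  ((m.find? (fun kv => kv.1 == "role")).map (·.2)) == some "user"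

-- ===== PORT A =====
-- the forward loop: last index whose message has role "user", else -1
def msluLast (working_messages : List (List (String × String))) : Int :=
  (PySem.List.enumerate working_messages).foldl
    (fun last_user_index p => if msluRoleIsUser p.2 then p.1 else last_user_index) (-1)

def messages_since_last_user_py (working_messages : List (List (String × String))) : List (List (String × String)) :=
  PySem.List.slice working_messages (some (msluLast working_messages + 1)) none

-- ===== PORT B =====
-- the backward loop of Source B: over reversed(working_messages), accumulating tail
def msluGo : List (List (String × String)) → List (List (String × String)) → List (List (String × String))
  | [], tail => tail
  | m :: rest, tail => if msluRoleIsUser m then tail else msluGo rest (m :: tail)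

def messages_since_last_user_py_alt (working_messages : List (List (String × String))) : List (List (String × String)) :=
  msluGo working_messages.reverse []

-- ===== PRECONDITION & SPEC =====
def Spec_messages_since_last_user_py (working_messages : List (List (String × String))) (out : List (List (String × String))) : Prop := out = messages_since_last_user_py_alt working_messages
instance (working_messages : List (List (String × String))) (out : List (List (String × String))) : Decidable (Spec_messages_since_last_user_py working_messages out) := by unfold Spec_messages_since_last_user_py; infer_instance

-- ===== CLAIM (what is proved, stated in full; the proofs are below) =====
def Claim_equal_messages_since_last_user_py : Prop := ∀ (working_messages : List (List (String × String))), Dom_messages_since_last_user_py working_messages → Spec_messages_since_last_user_py working_messages (messages_since_last_user_py working_messages)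

-- ===== LEMMAS AND PROOFS =====

theorem msluGo_eq (rws tail : List (List (String × String))) :
    msluGo rws tail = (rws.takeWhile (fun m => !msluRoleIsUser m)).reverse ++ tail := by
  induction rws generalizing tail with
  | nil => simp [msluGo]
  | cons m rest ih =>
    by_cases h : msluRoleIsUser m
    · simp [msluGo, List.takeWhile_cons, h]
    · simp [msluGo, h, ih]

theorem mslu_alt_eq (ws : List (List (String × String))) :
    messages_since_last_user_py_alt ws
      = (ws.reverse.takeWhile (fun m => !msluRoleIsUser m)).reverse := by
  simp [messages_since_last_user_py_alt, msluGo_eq]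

theorem msluLast_append (xs : List (List (String × String))) (x : List (String × String)) :
    msluLast (xs ++ [x]) = if msluRoleIsUser x then (xs.length : Int) else msluLast xs := by
  simp [msluLast, PySem.List.enumerate_append, List.foldl_append, PySem.List.enumerate]

theorem msluLast_bounds (ws : List (List (String × String))) :
    -1 ≤ msluLast ws ∧ msluLast ws < ws.length := by
  induction ws using List.reverseRecOn with
  | nil => simp [msluLast, PySem.List.enumerate]
  | append_singleton xs x ih =>
    rw [msluLast_append]
    by_cases h : msluRoleIsUser x <;> simp [h, List.length_append] <;> omega

theorem mslu_a_eq (ws : List (List (String × String))) :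
    messages_since_last_user_py ws
      = (ws.reverse.takeWhile (fun m => !msluRoleIsUser m)).reverse := by
  induction ws using List.reverseRecOn with
  | nil => simp [messages_since_last_user_py, msluLast, PySem.List.enumerate, PySem.List.slice]
  | append_singleton xs x ih =>
    unfold messages_since_last_user_py at *
    rw [msluLast_append]
    by_cases h : msluRoleIsUser x
    · have : ((xs.length : Int) + 1) = ((xs.length + 1 : Nat) : Int) := by push_cast; ring
      rw [if_pos h, this, PySem.List.slice_from_natCast]
      simp [List.takeWhile_cons, h]
    · rw [if_neg h]
      have hb := msluLast_bounds xs
      have h0 : (0 : Int) ≤ msluLast xs + 1 := by omega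
      rw [PySem.List.slice_from _ h0] at ih ⊢
      have hle : (msluLast xs + 1).toNat ≤ xs.length := by omega
      rw [List.drop_append_of_le_length hle, ih]
      simp [h]

-- ===== VERDICT (by name: the statement is the Claim_ definition above) =====
theorem messages_since_last_user_py_spec : Claim_equal_messages_since_last_user_py := by
  intro ws _
  unfold Spec_messages_since_last_user_py
  rw [mslu_a_eq, mslu_alt_eq]
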